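-- pv_equiv track=rewrite | github.com/mwolson/meetmix | tests/one-off/test-pw-record-isolate.py | check_linked
-- ===== SOURCE A (Python) =====
-- def check_linked(output, loopback_id, bt_sink_name):
--     current_owner = None
--     for line in output.splitlines():
--         stripped = line.strip()
--         if not stripped:
--             continue
--         if not line[0].isspace():
--             current_owner = stripped.split(":")[0] if ":" in stripped else None
--         elif "|" in stripped:
--             linked_to = stripped.split("|")[1].lstrip("-> ").lstrip("<- ")
--             linked_owner = linked_to.split(":")[0] if ":" in linked_to else ""
--             if current_owner and loopback_id in current_owner:
--                 if bt_sink_name in linked_owner: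
--                     return True
--             elif current_owner and bt_sink_name in current_owner:
--                 if loopback_id in linked_owner:
--                     return True
--     return False
-- ===== SOURCE B (Python) =====
-- def _parse_linked(stripped):
--     linked_to = stripped.split("|")[1].lstrip("-> ").lstrip("<- ")
--     return linked_to.split(":")[0] if ":" in linked_to else ""
--
--
-- def _hit(owner, linked, loopback_id, bt_sink_name):
--     if loopback_id in owner:
--         return bt_sink_name in linked
--     return bt_sink_name in owner and loopback_id in linked
--
--
-- def check_linked(output, loopback_id, bt_sink_name):
--     # Block decomposition: drop blank lines, then cut the text into
--     # (header, indented body) blocks and test each body as a whole.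
--     lines = [ln for ln in output.splitlines() if ln.strip()]
--     n = len(lines)
--     i = 0
--     while i < n and lines[i][0].isspace():  # indented lines before any header
--         i += 1
--     while i < n:
--         head = lines[i].strip()
--         owner = head.split(":")[0] if ":" in head else None
--         j = i + 1
--         while j < n and lines[j][0].isspace():
--             j += 1
--         if owner and any(_hit(owner, _parse_linked(s), loopback_id, bt_sink_name)
--                          for s in (ln.strip() for ln in lines[i + 1:j]) if "|" in s):
--             return True
--         i = j
--     return False
-- ===== Notes on version B (the rewrite author's own statement) =====
-- stated objective: alternative
-- what changed: A interleaves parsing and checking in one stateful loop with early return; B first drops blank lines, then cuts the text into (header, indented body) blocks and tests each block's body as a whole with any().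
import Mathlib
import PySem

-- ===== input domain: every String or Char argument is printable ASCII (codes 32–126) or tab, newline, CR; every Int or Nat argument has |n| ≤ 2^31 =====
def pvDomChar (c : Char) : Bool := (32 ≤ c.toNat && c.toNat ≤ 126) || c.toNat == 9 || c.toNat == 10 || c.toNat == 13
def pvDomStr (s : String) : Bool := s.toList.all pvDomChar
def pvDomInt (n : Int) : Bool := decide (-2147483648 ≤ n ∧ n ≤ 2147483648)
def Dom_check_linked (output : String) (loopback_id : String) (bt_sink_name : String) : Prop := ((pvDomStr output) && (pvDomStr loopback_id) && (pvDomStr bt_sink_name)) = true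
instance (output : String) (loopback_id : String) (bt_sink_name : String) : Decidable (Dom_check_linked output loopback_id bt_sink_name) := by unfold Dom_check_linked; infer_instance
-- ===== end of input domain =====

-- B replaces A's single stateful parse-and-check loop by a block decomposition: drop blank
-- lines, cut the text into (header, indented body) blocks, test each body as a whole;
-- objective: alternative, same cost.

-- ===== PORT A =====

-- Python s.lstrip(chars): drop leading characters that are members of the chars set (exact).
def pvLstrip (s : List Char) (chars : List Char) : List Char :=
  s.dropWhile (fun c => c ∈ chars)

-- one iteration of A's `for line in output.splitlines()` loop; state = (current_owner, returned?);
-- once the Python has returned (st.2 = true) the remaining iterations do not run.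
def pvStepA (loopback_id bt_sink_name : List Char) (st : Option (List Char) × Bool)
    (line : List Char) : Option (List Char) × Bool :=
  if st.2 then st else
  let cur := st.1
  let stripped := PySem.Chars.strip line
  if stripped = [] then (cur, false)                                -- if not stripped: continue
  else if !(PySem.Chars.isspace (line.head?.getD ' ')) then                    -- line[0] (line ≠ [] here, so head?.getD is exact)
    ((if PySem.Chars.isIn [':'] stripped
      then some ((PySem.Chars.splitOn stripped [':']).head?.getD []) else none), false)
  else if PySem.Chars.isIn ['|'] stripped then
    let linked_to := pvLstrip (pvLstrip (((PySem.Chars.splitOn stripped ['|'])[1]?).getD [])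
                      ['-', '>', ' ']) ['<', '-', ' ']              -- [1]? exact: '|' ∈ stripped gives ≥ 2 pieces
    let linked_owner := if PySem.Chars.isIn [':'] linked_to
      then (PySem.Chars.splitOn linked_to [':']).head?.getD [] else []
    match cur with
    | some o =>
        if o ≠ [] ∧ PySem.Chars.isIn loopback_id o = true then
          (cur, PySem.Chars.isIn bt_sink_name linked_owner)
        else if o ≠ [] ∧ PySem.Chars.isIn bt_sink_name o = true then
          (cur, PySem.Chars.isIn loopback_id linked_owner)
        else (cur, false)
    | none => (cur, false)
  else (cur, false)

def check_linked (output : String) (loopback_id : String) (bt_sink_name : String) : Bool :=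
  ((PySem.Chars.splitlines output.toList).foldl
    (pvStepA loopback_id.toList bt_sink_name.toList) (none, false)).2

-- ===== PORT B =====

-- _parse_linked
def pvParseLinked (stripped : List Char) : List Char :=
  let linked_to := pvLstrip (pvLstrip (((PySem.Chars.splitOn stripped ['|'])[1]?).getD [])
                    ['-', '>', ' ']) ['<', '-', ' ']
  if PySem.Chars.isIn [':'] linked_to
  then (PySem.Chars.splitOn linked_to [':']).head?.getD [] else []

-- _hit
def pvHit (owner linked loopback_id bt_sink_name : List Char) : Bool :=
  if PySem.Chars.isIn loopback_id owner then PySem.Chars.isIn bt_sink_name linked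
  else PySem.Chars.isIn bt_sink_name owner && PySem.Chars.isIn loopback_id linked

-- lines[i][0].isspace() (lines are nonblank, hence nonempty; same expression as A's port)
def pvIndented (line : List Char) : Bool := PySem.Chars.isspace (line.head?.getD ' ')

-- the main `while i < n` loop of B: lines is the remaining (blank-free) suffix, whose first
-- line — if any — is a header; body = the indented lines below it, then recurse on the rest.
def pvScan (loopback_id bt_sink_name : List Char) : List (List Char) → Bool
  | [] => false
  | line :: rest =>
      let head := PySem.Chars.strip line
      let owner : Option (List Char) := if PySem.Chars.isIn [':'] head
        then some ((PySem.Chars.splitOn head [':']).head?.getD []) else none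
      let body := rest.takeWhile pvIndented
      if (match owner with | some o => !o.isEmpty | none => false) &&
         body.any (fun ln =>
           PySem.Chars.isIn ['|'] (PySem.Chars.strip ln) &&
             pvHit (owner.getD []) (pvParseLinked (PySem.Chars.strip ln))
               loopback_id bt_sink_name)
      then true
      else pvScan loopback_id bt_sink_name (rest.dropWhile pvIndented)
  termination_by lines => lines.length
  decreasing_by exact Nat.lt_succ_of_le (List.length_dropWhile_le _ _)

def check_linked_alt (output : String) (loopback_id : String) (bt_sink_name : String) : Bool :=
  let lines := (PySem.Chars.splitlines output.toList).filter
    (fun ln => !(PySem.Chars.strip ln).isEmpty)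
  pvScan loopback_id.toList bt_sink_name.toList (lines.dropWhile pvIndented)

-- ===== PRECONDITION & SPEC =====
def Spec_check_linked (output : String) (loopback_id : String) (bt_sink_name : String) (out : Bool) : Prop := out = check_linked_alt output loopback_id bt_sink_name
instance (output : String) (loopback_id : String) (bt_sink_name : String) (out : Bool) : Decidable (Spec_check_linked output loopback_id bt_sink_name out) := by unfold Spec_check_linked; infer_instance

-- ===== CLAIM (what is proved, stated in full; the proofs are below) =====
def Claim_equal_check_linked : Prop := ∀ (output : String) (loopback_id : String) (bt_sink_name : String), Dom_check_linked output loopback_id bt_sink_name → Spec_check_linked output loopback_id bt_sink_name (check_linked output loopback_id bt_sink_name)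

-- ===== LEMMAS AND PROOFS =====

-- once A has returned, its state is frozen
lemma pvStepA_true (l b : List Char) (cur : Option (List Char)) (lines : List (List Char)) :
    lines.foldl (pvStepA l b) (cur, true) = (cur, true) := by
  induction lines with
  | nil => rfl
  | cons x xs ih => simpa [pvStepA] using ih

-- blank lines are no-ops of A's loop: folding over all lines = folding over the nonblank ones
lemma pvFoldA_filter (l b : List Char) (lines : List (List Char)) (st : Option (List Char) × Bool) :
    lines.foldl (pvStepA l b) st
      = (lines.filter (fun ln => !(PySem.Chars.strip ln).isEmpty)).foldl (pvStepA l b) st := by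
  induction lines generalizing st with
  | nil => rfl
  | cons x xs ih =>
      by_cases h : PySem.Chars.strip x = []
      · have hx : pvStepA l b st x = st := by
          rcases st with ⟨c, f⟩
          cases f <;> simp [pvStepA, h]
        simp [h, hx, ih]
      · simp [h, ih]

-- A's step on a nonblank indented line with owner cur: cur is kept and the flag is
-- exactly B's per-line test
lemma pvStepA_indented (l b : List Char) (cur : Option (List Char)) (ln : List Char)
    (hnb : PySem.Chars.strip ln ≠ []) (hin : pvIndented ln = true) :
    pvStepA l b (cur, false) ln
      = (cur, (match cur with | some o => !o.isEmpty | none => false) &&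
          (PySem.Chars.isIn ['|'] (PySem.Chars.strip ln) &&
            pvHit (cur.getD []) (pvParseLinked (PySem.Chars.strip ln)) l b)) := by
  unfold pvIndented at hin
  by_cases hp : PySem.Chars.isIn ['|'] (PySem.Chars.strip ln) = true
  · match cur with
    | none => simp [pvStepA, hnb, hin, hp]
    | some o =>
        by_cases ho : o = ([] : List Char)
        · subst ho; simp [pvStepA, hnb, hin, hp]
        · simp only [pvStepA, if_neg hnb, hin, Bool.not_true, Bool.false_eq_true, if_false,
            if_pos hp, Option.getD_some]
          by_cases hl : PySem.Chars.isIn l o = true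
          · rw [if_pos ⟨ho, hl⟩]
            simp [pvHit, pvParseLinked, hl, ho, hp]
          · simp only [Bool.not_eq_true] at hl
            rw [if_neg (by simp [hl])]
            by_cases hb : PySem.Chars.isIn b o = true
            · rw [if_pos ⟨ho, hb⟩]
              simp [pvHit, pvParseLinked, hl, hb, ho, hp]
            · simp only [Bool.not_eq_true] at hb
              rw [if_neg (by simp [hb])]
              simp [pvHit, pvParseLinked, hl, hb, hp]
  · simp only [Bool.not_eq_true] at hp
    match cur with
    | none => simp [pvStepA, hnb, hin, hp]
    | some o => simp [pvStepA, hnb, hin, hp, pvHit]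

-- when the carried owner is falsy, A's loop over a run of indented lines does nothing
lemma pvFoldA_inactive (l b : List Char) (cur : Option (List Char))
    (hcur : (match cur with | some o => !o.isEmpty | none => false) = false)
    (body : List (List Char)) :
    (∀ ln ∈ body, PySem.Chars.strip ln ≠ [] ∧ pvIndented ln = true) →
    body.foldl (pvStepA l b) (cur, false) = (cur, false) := by
  induction body with
  | nil => intro _; rfl
  | cons x xs ih =>
      intro hb
      obtain ⟨hnb, hin⟩ := hb x (List.mem_cons_self ..)
      rw [List.foldl_cons, pvStepA_indented l b cur x hnb hin, hcur, Bool.false_and]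
      exact ih (fun ln h => hb ln (List.mem_cons_of_mem _ h))

-- when the carried owner is a nonempty name, A's loop over a run of indented lines keeps
-- the owner and computes `any` of B's per-line test (early return = freezing the flag)
lemma pvFoldA_active (l b o : List Char) (ho : o.isEmpty = false)
    (body : List (List Char)) :
    (∀ ln ∈ body, PySem.Chars.strip ln ≠ [] ∧ pvIndented ln = true) →
    body.foldl (pvStepA l b) (some o, false)
      = (some o, body.any (fun ln =>
          PySem.Chars.isIn ['|'] (PySem.Chars.strip ln) &&
            pvHit o (pvParseLinked (PySem.Chars.strip ln)) l b)) := by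
  induction body with
  | nil => intro _; rfl
  | cons x xs ih =>
      intro hb
      obtain ⟨hnb, hin⟩ := hb x (List.mem_cons_self ..)
      rw [List.foldl_cons, pvStepA_indented l b (some o) x hnb hin]
      simp only [ho, Bool.not_false, Bool.true_and, Option.getD_some]
      cases hx : (PySem.Chars.isIn ['|'] (PySem.Chars.strip x) &&
          pvHit o (pvParseLinked (PySem.Chars.strip x)) l b) with
      | false =>
          rw [ih (fun ln h => hb ln (List.mem_cons_of_mem _ h))]
          simp [List.any_cons, hx]
      | true =>
          rw [pvStepA_true]
          simp [List.any_cons, hx]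

-- main lemma: on a blank-free line list whose first line (if any) is a header,
-- A's remaining loop equals B's block recursion, for ANY carried owner
lemma pvMain (l b : List Char) (lines : List (List Char)) :
    (∀ ln ∈ lines, PySem.Chars.strip ln ≠ []) →
    (∀ ln, lines.head? = some ln → pvIndented ln = false) →
    ∀ cur, (lines.foldl (pvStepA l b) (cur, false)).2 = pvScan l b lines := by
  induction lines using pvScan.induct l b with
  | case1 => intro _ _ cur; simp [pvScan]
  | case2 line rest _hd _ow _bd hcond =>
      intro hbf hhd cur
      have hline : PySem.Chars.strip line ≠ [] := hbf line (List.mem_cons_self ..)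
      have hhead : pvIndented line = false := hhd line rfl
      simp only [_hd, _ow, _bd] at hcond
      have hbody : ∀ ln ∈ rest.takeWhile pvIndented,
          PySem.Chars.strip ln ≠ [] ∧ pvIndented ln = true := by
        intro ln hln
        exact ⟨hbf ln (List.mem_cons_of_mem _ ((List.takeWhile_sublist _).mem hln)),
               List.mem_takeWhile_imp hln⟩
      by_cases hcol : PySem.Chars.isIn [':'] (PySem.Chars.strip line) = true
      case neg => simp [hcol] at hcond
      simp only [dite_eq_ite] at hcond
      rw [if_pos hcol] at hcond
      simp only [Option.getD_some, Bool.and_eq_true] at hcond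
      obtain ⟨ho', hany'⟩ := hcond
      have ho : ((PySem.Chars.splitOn (PySem.Chars.strip line) [':']).head?.getD
          ([] : List Char)).isEmpty = false := by simpa using ho'
      have hany : (rest.takeWhile pvIndented).any (fun ln =>
          PySem.Chars.isIn ['|'] (PySem.Chars.strip ln) &&
            pvHit ((PySem.Chars.splitOn (PySem.Chars.strip line) [':']).head?.getD [])
              (pvParseLinked (PySem.Chars.strip ln)) l b) = true := hany'
      have hstep : pvStepA l b (cur, false) line
          = (some ((PySem.Chars.splitOn (PySem.Chars.strip line) [':']).head?.getD []),
             false) := by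
        unfold pvIndented at hhead
        simp [pvStepA, hline, hhead, hcol]
      conv_lhs => rw [List.foldl_cons, hstep,
        show rest = rest.takeWhile pvIndented ++ rest.dropWhile pvIndented from
          (List.takeWhile_append_dropWhile ..).symm]
      rw [List.foldl_append, pvFoldA_active l b _ ho _ hbody, hany, pvStepA_true]
      conv_rhs => rw [pvScan]
      simp [hcol, ho, hany]
  | case3 line rest _hd _ow _bd hcond ih =>
      intro hbf hhd cur
      have hline : PySem.Chars.strip line ≠ [] := hbf line (List.mem_cons_self ..)
      have hhead : pvIndented line = false := hhd line rfl
      simp only [_hd, _ow, _bd, dite_eq_ite] at hcond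
      rw [Bool.not_eq_true] at hcond
      have hbody : ∀ ln ∈ rest.takeWhile pvIndented,
          PySem.Chars.strip ln ≠ [] ∧ pvIndented ln = true := by
        intro ln hln
        exact ⟨hbf ln (List.mem_cons_of_mem _ ((List.takeWhile_sublist _).mem hln)),
               List.mem_takeWhile_imp hln⟩
      -- whatever owner A carries out of the header line, the body run leaves the flag false
      have key : ∀ (ow : Option (List Char)),
          pvStepA l b (cur, false) line = (ow, false) →
          (rest.takeWhile pvIndented).foldl (pvStepA l b) (ow, false) = (ow, false) →
          ((line :: rest).foldl (pvStepA l b) (cur, false)).2 = pvScan l b (line :: rest) := by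
        intro ow hstep hbodyrun
        conv_lhs => rw [List.foldl_cons, hstep,
          show rest = rest.takeWhile pvIndented ++ rest.dropWhile pvIndented from
            (List.takeWhile_append_dropWhile ..).symm]
        rw [List.foldl_append, hbodyrun]
        conv_rhs => rw [pvScan]
        rw [if_neg (by simp [hcond])]
        exact ih (fun ln h => hbf ln (List.mem_cons_of_mem _
              ((List.dropWhile_sublist _).mem h)))
          (fun ln h => by
            have := List.head?_dropWhile_not pvIndented rest
            rw [h] at this
            simpa using this)
          ow
      by_cases hcol : PySem.Chars.isIn [':'] (PySem.Chars.strip line) = true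
      · have hstep : pvStepA l b (cur, false) line
            = (some ((PySem.Chars.splitOn (PySem.Chars.strip line) [':']).head?.getD []),
               false) := by
          unfold pvIndented at hhead
          simp [pvStepA, hline, hhead, hcol]
        by_cases ho : ((PySem.Chars.splitOn (PySem.Chars.strip line) [':']).head?.getD
            ([] : List Char)).isEmpty = true
        · exact key _ hstep (pvFoldA_inactive l b _ (by simp [ho]) _ hbody)
        · rw [Bool.not_eq_true] at ho
          have hany : (rest.takeWhile pvIndented).any (fun ln =>
              PySem.Chars.isIn ['|'] (PySem.Chars.strip ln) &&
                pvHit ((PySem.Chars.splitOn (PySem.Chars.strip line) [':']).head?.getD [])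
                  (pvParseLinked (PySem.Chars.strip ln)) l b) = false := by
            rw [if_pos hcol] at hcond
            simpa [ho] using hcond
          exact key _ hstep (by rw [pvFoldA_active l b _ ho _ hbody, hany])
      · have hstep : pvStepA l b (cur, false) line = (none, false) := by
          unfold pvIndented at hhead
          simp [pvStepA, hline, hhead, hcol]
        exact key none hstep (pvFoldA_inactive l b none rfl _ hbody)

-- ===== VERDICT (by name: the statement is the Claim_ definition above) =====
theorem check_linked_spec : Claim_equal_check_linked := by
  intro output loopback_id bt_sink_name _
  show check_linked output loopback_id bt_sink_name = check_linked_alt output loopback_id bt_sink_name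
  unfold check_linked check_linked_alt
  rw [pvFoldA_filter]
  set lines := (PySem.Chars.splitlines output.toList).filter
    (fun ln => !(PySem.Chars.strip ln).isEmpty) with hlines
  have hbf : ∀ ln ∈ lines, PySem.Chars.strip ln ≠ [] := by
    intro ln h
    have := (List.mem_filter.mp h).2
    simpa using this
  -- dropping the leading indented lines is a no-op of A's loop while the owner is still none
  have hlead : ∀ (ls : List (List Char)), (∀ ln ∈ ls, PySem.Chars.strip ln ≠ []) →
      (ls.foldl (pvStepA loopback_id.toList bt_sink_name.toList) (none, false)).2
        = ((ls.dropWhile pvIndented).foldl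
            (pvStepA loopback_id.toList bt_sink_name.toList) (none, false)).2 := by
    intro ls hls
    induction ls with
    | nil => rfl
    | cons x xs ih =>
        by_cases hx : pvIndented x = true
        · have hnb := hls x (List.mem_cons_self ..)
          rw [List.foldl_cons, pvStepA_indented _ _ none x hnb hx,
              List.dropWhile_cons_of_pos hx]
          simpa using ih (fun ln h => hls ln (List.mem_cons_of_mem _ h))
        · rw [List.dropWhile_cons_of_neg hx]
  rw [hlead lines hbf]
  exact pvMain loopback_id.toList bt_sink_name.toList (lines.dropWhile pvIndented)
    (fun ln h => hbf ln ((List.dropWhile_sublist _).mem h))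
    (fun ln h => by
      have := List.head?_dropWhile_not pvIndented lines
      rw [h] at this
      simpa using this)
    none
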